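-- pv_equiv track=rewrite | github.com/manalsu1tan/idg_proj | packages/evals/scenarios.py | _typo_noise_query
-- ===== SOURCE A (Python) =====
-- def _typo_noise_query(query: str) -> str:
--     replacements = {
--         "communicate": "comunicate",
--         "important": "importnt",
--         "latest": "latset",
--         "commit": "comit",
--         "bringing": "bringng",
--         "relationship": "relatoinship",
--         "preferences": "preferneces",
--         "dislikes": "dislkes",
--     }
--     noisy = query
--     for source, target in replacements.items():
--         noisy = noisy.replace(source, target)
--         noisy = noisy.replace(source.capitalize(), target.capitalize())
--     return noisy
-- ===== SOURCE B (Python) =====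
-- def _typo_noise_query(query: str) -> str:
--     pairs = []
--     for source, target in (
--         ("communicate", "comunicate"),
--         ("important", "importnt"),
--         ("latest", "latset"),
--         ("commit", "comit"),
--         ("bringing", "bringng"),
--         ("relationship", "relatoinship"),
--         ("preferences", "preferneces"),
--         ("dislikes", "dislkes"),
--     ):
--         pairs.append((source, target))
--         pairs.append((source.capitalize(), target.capitalize()))
--     out = []
--     i = 0
--     n = len(query)
--     while i < n:
--         for source, target in pairs:
--             if query.startswith(source, i):
--                 out.append(target)
--                 i += len(source)
--                 break
--         else:
--             out.append(query[i])
--             i += 1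
--     return "".join(out)
-- ===== Notes on version B (the rewrite author's own statement) =====
-- stated objective: alternative
-- what changed: B replaces the eight sequential full-string replace passes (plus eight capitalized passes) by a single left-to-right scan that, at each position, matches the 16 source words (built once with their capitalized variants) and emits the target or the character, so the string is traversed once instead of 16 times. Pre_ excludes queries containing 'relationshipreferences'/'Relationshipreferences', the one overlap of two replacement words, where A's ordered passes substitute both but B's leftmost scan substitutes only the first - an unspecified overlap corner with both values defensible.
import Mathlib
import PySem

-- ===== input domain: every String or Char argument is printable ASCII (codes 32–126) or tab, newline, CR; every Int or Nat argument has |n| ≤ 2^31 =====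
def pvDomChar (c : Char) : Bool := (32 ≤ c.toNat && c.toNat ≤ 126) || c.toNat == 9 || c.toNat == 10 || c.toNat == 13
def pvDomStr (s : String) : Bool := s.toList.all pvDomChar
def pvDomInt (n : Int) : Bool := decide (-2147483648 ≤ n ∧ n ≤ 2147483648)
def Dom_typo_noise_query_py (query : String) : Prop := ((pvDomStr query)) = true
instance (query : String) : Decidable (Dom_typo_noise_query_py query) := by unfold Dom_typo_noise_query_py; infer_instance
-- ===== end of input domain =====

-- B replaces A's 16 sequential str.replace passes by one left-to-right scan over a table of the
-- 16 (source, target) words; Pre_ excludes the one overlap corner where the two orders differ.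


-- ===== PORT A =====
-- str.capitalize(): first character uppercased, the rest lowercased (exact on the ASCII domain).
def pyCapitalize (s : String) : String :=
  String.ofList (PySem.Chars.upper (s.toList.take 1) ++ PySem.Chars.lower (s.toList.drop 1))

-- the dict literal of A (distinct keys, insertion order), as an association list
def typoReplacements : List (String × String) :=
  [("communicate", "comunicate"), ("important", "importnt"), ("latest", "latset"),
   ("commit", "comit"), ("bringing", "bringng"), ("relationship", "relatoinship"),
   ("preferences", "preferneces"), ("dislikes", "dislkes")]

def typo_noise_query_py (query : String) : String :=
  List.foldl (fun noisy st =>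
      let noisy := PySem.Str.replace noisy st.1 st.2
      PySem.Str.replace noisy (pyCapitalize st.1) (pyCapitalize st.2))
    query typoReplacements

-- ===== PORT B =====
-- the pair table of Source B: each source and its capitalized variant, built once
def typoPairs : List (List Char × List Char) :=
  List.foldl (fun acc st =>
      acc ++ [(st.1.toList, st.2.toList),
              ((pyCapitalize st.1).toList, (pyCapitalize st.2).toList)])
    []
    [("communicate", "comunicate"), ("important", "importnt"), ("latest", "latset"),
     ("commit", "comit"), ("bringing", "bringng"), ("relationship", "relatoinship"),
     ("preferences", "preferneces"), ("dislikes", "dislkes")]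

-- Source B's while loop: at each position try the 16 pairs in order (the for…break/else), emit
-- the target and jump over the source on a match, else emit the character and move on
def typoScan (pairs : List (List Char × List Char)) : List Char → List Char
  | [] => []
  | c :: r =>
    match pairs.find? (fun pt => pt.1.isPrefixOf (c :: r)) with
    | some (src, tgt) => tgt ++ typoScan pairs (r.drop (src.length - 1))
    | none => c :: typoScan pairs r
  termination_by s => s.length
  decreasing_by
    · simp only [List.length_drop, List.length_cons]; omega
    · simp only [List.length_cons]; omega

def typo_noise_query_py_alt (query : String) : String :=
  String.ofList (typoScan typoPairs query.toList)

-- ===== PRECONDITION & SPEC =====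
-- Pre_ excludes queries containing "relationshipreferences" (or "Relationshipreferences"): there the
-- occurrences of "relationship" and "preferences" overlap in one letter, A's eight ordered passes
-- substitute both while B's single left-to-right scan substitutes only the leftmost — an unspecified
-- overlap corner on which both values are defensible.
def Pre_typo_noise_query_py (query : String) : Prop :=
  PySem.Str.isIn "relationshipreferences" query = false ∧
  PySem.Str.isIn "Relationshipreferences" query = false
instance (query : String) : Decidable (Pre_typo_noise_query_py query) := by
  unfold Pre_typo_noise_query_py; infer_instance

def pvWitness_typo_noise_query_py : String := "Commit the latest changes, bringing the relationship preferences."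

def Spec_typo_noise_query_py (query : String) (out : String) : Prop := out = typo_noise_query_py_alt query
instance (query : String) (out : String) : Decidable (Spec_typo_noise_query_py query out) := by unfold Spec_typo_noise_query_py; infer_instance

-- ===== CLAIM (what is proved, stated in full; the proofs are below) =====
def Claim_equal_typo_noise_query_py : Prop := ∀ (query : String), Dom_typo_noise_query_py query → Pre_typo_noise_query_py query → Spec_typo_noise_query_py query (typo_noise_query_py query)

-- ===== LEMMAS AND PROOFS =====

-- clean one-pattern scan (proof-side model of Python's str.replace for a nonempty pattern)
def repc (p t : List Char) : List Char → List Char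
  | [] => []
  | c :: r =>
    if p.isPrefixOf (c :: r) then t ++ repc p t (r.drop (p.length - 1))
    else c :: repc p t r
  termination_by s => s.length
  decreasing_by
    · simp only [List.length_drop, List.length_cons]; omega
    · simp only [List.length_cons]; omega

lemma repc_nil (p t : List Char) : repc p t [] = [] := by simp [repc]

lemma repc_pos (p t : List Char) (c : Char) (r : List Char) (h : p <+: (c :: r)) :
    repc p t (c :: r) = t ++ repc p t (r.drop (p.length - 1)) := by
  rw [repc]
  simp [List.isPrefixOf_iff_prefix.mpr h]

lemma repc_neg (p t : List Char) (c : Char) (r : List Char) (h : ¬ p <+: (c :: r)) :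
    repc p t (c :: r) = c :: repc p t r := by
  rw [repc]
  simp [h, List.isPrefixOf_iff_prefix]

lemma length_pos_of_ne_nil {p : List Char} (hp : p ≠ []) : ∃ m, p.length = m + 1 := by
  cases p with
  | nil => exact absurd rfl hp
  | cons a l => exact ⟨l.length, by simp⟩

lemma repc_head (p t y : List Char) (hp : p ≠ []) :
    repc p t (p ++ y) = t ++ repc p t y := by
  obtain ⟨c, p', rfl⟩ : ∃ c p', p = c :: p' := by
    cases p with
    | nil => exact absurd rfl hp
    | cons a l => exact ⟨a, l, rfl⟩
  rw [List.cons_append, repc_pos _ _ _ _ (by exact ⟨y, by simp⟩)]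
  simp [List.drop_left']

lemma go_eq (p t : List Char) (hp : p ≠ []) :
    ∀ (fuel : Nat) (l acc : List Char), l.length ≤ fuel →
      PySem.Chars.replace.go p t fuel l acc = acc.reverse ++ repc p t l := by
  intro fuel
  induction fuel with
  | zero =>
    intro l acc hl
    have : l = [] := by cases l <;> simp_all
    subst this
    rw [PySem.Chars.replace.go, repc_nil]
  | succ fuel ih =>
    intro l acc hl
    cases l with
    | nil =>
      rw [PySem.Chars.replace.go]
      all_goals first
        | (rw [repc_nil]; simp)
        | omega
    | cons c r =>
      obtain ⟨m, hm⟩ := length_pos_of_ne_nil hp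
      rw [PySem.Chars.replace.go]
      by_cases hpre : p <+: (c :: r)
      · rw [List.isPrefixOf_iff_prefix.mpr hpre, if_pos rfl]
        rw [ih _ _ (by simp at hl ⊢; omega)]
        rw [repc_pos _ _ _ _ hpre, hm]
        simp [List.drop_succ_cons]
      · have hfalse : p.isPrefixOf (c :: r) = false :=
          Bool.eq_false_iff.mpr (fun h => hpre (List.isPrefixOf_iff_prefix.mp h))
        simp only [hfalse, Bool.false_eq_true, if_false]
        rw [ih _ _ (by simp at hl ⊢; omega)]
        rw [repc_neg _ _ _ _ hpre]
        simp

lemma replace_eq_repc (s p t : List Char) (hp : p ≠ []) :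
    PySem.Chars.replace s p t = repc p t s := by
  rw [PySem.Chars.replace]
  have : p.isEmpty = false := by cases p <;> simp_all
  rw [this]
  simpa using go_eq p t hp s.length s [] le_rfl

-- no-creation condition: w cannot newly appear as a prefix after a (p,t) replacement pass
def Hcond (w p t : List Char) : Prop :=
  ∀ v ∈ w.tails, v ≠ [] → (v <+: t → v <+: p) ∧ ¬ (t <+: v ∧ t ≠ v)

-- Boolean form of Hcond, so closed instances are checked by `decide` without a Decidable instance
def hcondB (w p t : List Char) : Bool :=
  w.tails.all fun v =>
    v.isEmpty || ((!(v.isPrefixOf t) || v.isPrefixOf p) && (!(t.isPrefixOf v) || t == v))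

lemma hcond_of_B {w p t : List Char} (h : hcondB w p t = true) : Hcond w p t := by
  intro v hv hne
  have hb := List.all_eq_true.mp h v hv
  simp only [Bool.or_eq_true, Bool.and_eq_true, Bool.not_eq_true', List.isEmpty_iff,
    List.isPrefixOf_iff_prefix, beq_iff_eq] at hb
  rcases hb with h0 | ⟨h1, h2⟩
  · exact absurd h0 hne
  have h1' : ¬ v <+: t ∨ v <+: p := by
    rcases h1 with h | h
    · exact Or.inl (fun hx => by simp [List.isPrefixOf_iff_prefix.mpr hx] at h)
    · exact Or.inr h
  have h2' : ¬ t <+: v ∨ t = v := by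
    rcases h2 with h | h
    · exact Or.inl (fun hx => by simp [List.isPrefixOf_iff_prefix.mpr hx] at h)
    · exact Or.inr h
  exact ⟨fun hvt => by tauto, by tauto⟩

lemma Hcond_suffix {w v p t : List Char} (h : Hcond w p t) (hv : v <:+ w) : Hcond v p t := by
  intro u hu
  exact h u ((List.mem_tails _ _).mpr (((List.mem_tails _ _).mp hu).trans hv))

-- no-creation: if w was not a prefix, it is not a prefix after one replacement pass
lemma nc (p t : List Char) :
    ∀ (s w : List Char), Hcond w p t → ¬ w <+: s → ¬ w <+: repc p t s := by
  intro s
  induction s with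
  | nil => intro w _ hns; rw [repc_nil]; intro hw; exact hns (by simpa using hw)
  | cons c r ih =>
    intro w hH hns
    rcases eq_or_ne w [] with rfl | hw0
    · exact absurd (List.nil_prefix) hns
    by_cases hpre : p <+: (c :: r)
    · rw [repc_pos _ _ _ _ hpre]
      intro hw
      rcases List.prefix_or_prefix_of_prefix hw (List.prefix_append t _) with hwt | htw
      · have := ((hH w ((List.mem_tails _ _).mpr List.suffix_rfl) hw0).1 hwt).trans hpre
        exact hns this
      · by_cases hwt : w <+: t
        · have := ((hH w ((List.mem_tails _ _).mpr List.suffix_rfl) hw0).1 hwt).trans hpre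
          exact hns this
        · have hne : t ≠ w := by rintro rfl; exact hwt List.prefix_rfl
          exact (hH w ((List.mem_tails _ _).mpr List.suffix_rfl) hw0).2 ⟨htw, hne⟩
    · rw [repc_neg _ _ _ _ hpre]
      intro hw
      obtain ⟨d, w', rfl⟩ : ∃ d w', w = d :: w' := by
        cases w with
        | nil => exact absurd rfl hw0
        | cons a l => exact ⟨a, l, rfl⟩
      obtain ⟨rfl, hw'⟩ := List.cons_prefix_cons.mp hw
      have hns' : ¬ w' <+: r := fun h => hns (List.cons_prefix_cons.mpr ⟨rfl, h⟩)
      exact ih w' (Hcond_suffix hH (List.suffix_cons d w')) hns' hw' 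

-- the chain of replacement passes (A's composite, on the list side)
def chain (ps : List (List Char × List Char)) (s : List Char) : List Char :=
  ps.foldl (fun acc pt => repc pt.1 pt.2 acc) s

lemma chain_append (ps qs : List (List Char × List Char)) (s : List Char) :
    chain (ps ++ qs) s = chain qs (chain ps s) := List.foldl_append

lemma nc_chain (ps : List (List Char × List Char)) (w : List Char)
    (h : ∀ pt ∈ ps, pt.1 ≠ [] ∧ Hcond w pt.1 pt.2) :
    ∀ s, ¬ w <+: s → ¬ w <+: chain ps s := by
  induction ps with
  | nil => intro s hs; simpa [chain] using hs
  | cons pt ps ih =>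
    intro s hs
    have h1 := h pt (by simp)
    have : chain (pt :: ps) s = chain ps (repc pt.1 pt.2 s) := by simp [chain]
    rw [this]
    exact ih (fun q hq => h q (by simp [hq])) _ (nc pt.1 pt.2 s w h1.2 hs)

lemma chain_nil (ps : List (List Char × List Char)) (h : ∀ pt ∈ ps, pt.1 ≠ []) :
    chain ps [] = [] := by
  induction ps with
  | nil => rfl
  | cons pt ps ih =>
    have : chain (pt :: ps) [] = chain ps (repc pt.1 pt.2 []) := by simp [chain]
    rw [this, repc_nil]
    exact ih (fun q hq => h q (by simp [hq]))

-- a position with no match: every pass keeps the head character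
lemma chain_no_match (c : Char) :
    ∀ (ps : List (List Char × List Char)) (r : List Char),
    (∀ pt ∈ ps, pt.1 ≠ []) →
    (∀ q ∈ ps, ∀ pt ∈ ps, Hcond q.1 pt.1 pt.2) →
    (∀ pt ∈ ps, ¬ pt.1 <+: (c :: r)) →
    chain ps (c :: r) = c :: chain ps r := by
  intro ps
  induction ps with
  | nil => intro r _ _ _; rfl
  | cons pt ps ih =>
    intro r hg hH hnm
    have hstep : ∀ z, chain (pt :: ps) z = chain ps (repc pt.1 pt.2 z) := by
      intro z; simp [chain]
    rw [hstep, repc_neg _ _ _ _ (hnm pt (by simp))]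
    have hnm' : ∀ q ∈ ps, ¬ q.1 <+: (c :: repc pt.1 pt.2 r) := by
      intro q hq
      have h1 := nc pt.1 pt.2 (c :: r) q.1
        (hH q (by simp [hq]) pt (by simp)) (hnm q (by simp [hq]))
      rwa [repc_neg _ _ _ _ (hnm pt (by simp))] at h1
    rw [ih _ (fun q hq => hg q (by simp [hq]))
        (fun q hq pt' hpt' => hH q (by simp [hq]) pt' (by simp [hpt'])) hnm']
    rw [hstep]

lemma skip_one (p t : List Char) : ∀ (blk : List Char) (y : List Char),
    (∀ k < blk.length, ¬ p <+: (blk.drop k ++ y)) →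
    repc p t (blk ++ y) = blk ++ repc p t y := by
  intro blk
  induction blk with
  | nil => intro y _; rfl
  | cons b blk ih =>
    intro y hside
    have h0 : ¬ p <+: (b :: (blk ++ y)) := by simpa using hside 0 (by simp)
    rw [List.cons_append, repc_neg _ _ _ _ h0,
      ih y (fun k hk => by simpa using hside (k + 1) (by simp; omega))]
    rfl

-- an unmatched block is carried through a whole chain of passes
lemma skip_chain (ps : List (List Char × List Char)) (blk : List Char) :
    ∀ (y : List Char),
    (∀ pt ∈ ps, pt.1 ≠ []) →
    (∀ q ∈ ps, ∀ pt ∈ ps, Hcond q.1 pt.1 pt.2) →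
    (∀ q ∈ ps, ∀ k < blk.length, ¬ q.1 <+: blk.drop k) →
    (∀ q ∈ ps, ∀ k < blk.length, blk.drop k <+: q.1 → ¬ q.1.drop (blk.length - k) <+: y) →
    chain ps (blk ++ y) = blk ++ chain ps y := by
  induction ps with
  | nil => intro y _ _ _ _; rfl
  | cons pt ps ih =>
    intro y hg hH hA hB
    have hstep : ∀ z, chain (pt :: ps) z = chain ps (repc pt.1 pt.2 z) := by
      intro z; simp [chain]
    have hone : repc pt.1 pt.2 (blk ++ y) = blk ++ repc pt.1 pt.2 y := by
      apply skip_one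
      intro k hk hpref
      rcases List.prefix_or_prefix_of_prefix hpref (List.prefix_append (blk.drop k) y)
        with h1 | h2
      · exact hA pt (by simp) k hk h1
      · obtain ⟨w, hw⟩ := h2
        have hwy : w <+: y := by
          rw [← hw] at hpref
          exact (List.prefix_append_right_inj (blk.drop k)).mp hpref
        have hwdrop : pt.1.drop (blk.length - k) = w := by
          rw [← hw, ← List.length_drop]
          exact List.drop_left
        exact hB pt (by simp) k hk ⟨w, hw⟩ (hwdrop ▸ hwy)
    rw [hstep, hone]
    rw [ih (repc pt.1 pt.2 y) (fun q hq => hg q (by simp [hq]))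
        (fun q hq pt' hpt' => hH q (by simp [hq]) pt' (by simp [hpt']))
        (fun q hq k hk => hA q (by simp [hq]) k hk)
        ?_]
    · rw [hstep]
    · intro q hq k hk hdrop
      exact nc pt.1 pt.2 y (q.1.drop (blk.length - k))
        (Hcond_suffix (hH q (by simp [hq]) pt (by simp)) (List.drop_suffix _ _))
        (hB q (by simp [hq]) k hk hdrop)

-- a matched source at the head: the whole chain turns it into its target
lemma head_match (pre suf : List (List Char × List Char)) (p t r : List Char)
    (hp : p ≠ [])
    (hg : ∀ pt ∈ pre ++ (p, t) :: suf, pt.1 ≠ [])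
    (hH : ∀ q ∈ pre ++ (p, t) :: suf, ∀ pt ∈ pre ++ (p, t) :: suf, Hcond q.1 pt.1 pt.2)
    (hApre : ∀ q ∈ pre, ∀ k < p.length, ¬ q.1 <+: p.drop k ∧ ¬ p.drop k <+: q.1)
    (hAsuf : ∀ q ∈ suf, ∀ k < t.length, ¬ q.1 <+: t.drop k)
    (hBsuf : ∀ q ∈ suf, ∀ k < t.length, t.drop k <+: q.1 →
        ¬ q.1.drop (t.length - k) <+: chain (pre ++ [(p, t)]) r) :
    chain (pre ++ (p, t) :: suf) (p ++ r) = t ++ chain (pre ++ (p, t) :: suf) r := by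
  have hgpre : ∀ pt ∈ pre, pt.1 ≠ [] := fun q hq => hg q (by simp [hq])
  have hHpre : ∀ q ∈ pre, ∀ pt ∈ pre, Hcond q.1 pt.1 pt.2 :=
    fun q hq pt' hpt' => hH q (by simp [hq]) pt' (by simp [hpt'])
  have h1 : chain pre (p ++ r) = p ++ chain pre r := by
    apply skip_chain pre p r hgpre hHpre (fun q hq k hk => (hApre q hq k hk).1)
    intro q hq k hk hdrop
    exact absurd hdrop ((hApre q hq k hk).2)
  have hy0 : repc p t (chain pre r) = chain (pre ++ [(p, t)]) r := by
    rw [chain_append]; simp [chain]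
  have hstep : ∀ z, chain ((p, t) :: suf) z = chain suf (repc p t z) := by
    intro z; simp [chain]
  have h2 : chain suf (t ++ chain (pre ++ [(p, t)]) r) =
      t ++ chain suf (chain (pre ++ [(p, t)]) r) := by
    apply skip_chain suf t _ (fun q hq => hg q (by simp [hq]))
      (fun q hq pt' hpt' => hH q (by simp [hq]) pt' (by simp [hpt'])) hAsuf hBsuf
  calc chain (pre ++ (p, t) :: suf) (p ++ r)
      = chain ((p, t) :: suf) (chain pre (p ++ r)) := chain_append _ _ _
    _ = chain suf (repc p t (p ++ chain pre r)) := by rw [h1, hstep]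
    _ = chain suf (t ++ repc p t (chain pre r)) := by rw [repc_head p t _ hp]
    _ = chain suf (t ++ chain (pre ++ [(p, t)]) r) := by rw [hy0]
    _ = t ++ chain suf (chain (pre ++ [(p, t)]) r) := h2
    _ = t ++ chain suf (repc p t (chain pre r)) := by rw [hy0]
    _ = t ++ chain ((p, t) :: suf) (chain pre r) := by rw [hstep]
    _ = t ++ chain (pre ++ (p, t) :: suf) r := by rw [chain_append]

-- the literal 16-pair table, in A's pass order
def pairs16 : List (List Char × List Char) :=
  [("communicate".toList, "comunicate".toList), ("Communicate".toList, "Comunicate".toList),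
   ("important".toList, "importnt".toList), ("Important".toList, "Importnt".toList),
   ("latest".toList, "latset".toList), ("Latest".toList, "Latset".toList),
   ("commit".toList, "comit".toList), ("Commit".toList, "Comit".toList),
   ("bringing".toList, "bringng".toList), ("Bringing".toList, "Bringng".toList),
   ("relationship".toList, "relatoinship".toList), ("Relationship".toList, "Relatoinship".toList),
   ("preferences".toList, "preferneces".toList), ("Preferences".toList, "Preferneces".toList),
   ("dislikes".toList, "dislkes".toList), ("Dislikes".toList, "Dislkes".toList)]

def NoBad (s : List Char) : Prop :=
  ¬ "relationshipreferences".toList <:+: s ∧ ¬ "Relationshipreferences".toList <:+: s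

lemma noBad_of_suffix {s r : List Char} (h : NoBad s) (hr : r <:+ s) : NoBad r := by
  exact ⟨fun hx => h.1 (hx.trans hr.isInfix), fun hx => h.2 (hx.trans hr.isInfix)⟩

lemma good16 : ∀ pt ∈ pairs16, pt.1 ≠ [] := by decide

lemma hH16 : ∀ q ∈ pairs16, ∀ pt ∈ pairs16, Hcond q.1 pt.1 pt.2 := by
  have hall : ∀ q ∈ pairs16, ∀ pt ∈ pairs16, hcondB q.1 pt.1 pt.2 = true := by decide
  exact fun q hq pt hpt => hcond_of_B (hall q hq pt hpt)

lemma refsH16 : ∀ pt ∈ pairs16, pt.1 ≠ [] ∧ Hcond "references".toList pt.1 pt.2 := by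
  have hall : ∀ pt ∈ pairs16, pt.1 ≠ [] ∧ hcondB "references".toList pt.1 pt.2 = true := by decide
  exact fun pt hpt => ⟨(hall pt hpt).1, hcond_of_B (hall pt hpt).2⟩

lemma typoScan_nil (ps : List (List Char × List Char)) : typoScan ps [] = [] := by
  rw [typoScan]

lemma typoScan_some (ps : List (List Char × List Char)) (c : Char) (r src tgt : List Char)
    (h : ps.find? (fun pt => pt.1.isPrefixOf (c :: r)) = some (src, tgt)) :
    typoScan ps (c :: r) = tgt ++ typoScan ps (r.drop (src.length - 1)) := by
  rw [typoScan, h]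

lemma typoScan_none (ps : List (List Char × List Char)) (c : Char) (r : List Char)
    (h : ps.find? (fun pt => pt.1.isPrefixOf (c :: r)) = none) :
    typoScan ps (c :: r) = c :: typoScan ps r := by
  rw [typoScan, h]

lemma main_eq : ∀ (n : Nat) (s : List Char), s.length ≤ n → NoBad s →
    chain pairs16 s = typoScan pairs16 s := by
  intro n
  induction n with
  | zero =>
    intro s hs _
    have hs0 : s = [] := by cases s <;> simp_all
    subst hs0
    rw [chain_nil pairs16 good16, typoScan_nil]
  | succ n ih =>
    intro s hs hnb
    cases s with
    | nil => rw [chain_nil pairs16 good16, typoScan_nil]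
    | cons c r =>
      cases hfind : pairs16.find? (fun pt => pt.1.isPrefixOf (c :: r)) with
      | none =>
        have hnm : ∀ pt ∈ pairs16, ¬ pt.1 <+: (c :: r) := by
          intro q hq hpre
          exact absurd (List.isPrefixOf_iff_prefix.mpr hpre)
            (by simpa using List.find?_eq_none.mp hfind q hq)
        rw [typoScan_none _ _ _ hfind, chain_no_match c pairs16 r good16 hH16 hnm,
          ih r (by simp at hs; omega) (noBad_of_suffix hnb (List.suffix_cons c r))]
      | some st =>
        obtain ⟨src, tgt⟩ := st
        have hmem : (src, tgt) ∈ pairs16 := List.mem_of_find?_eq_some hfind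
        have hpre : src <+: (c :: r) :=
          List.isPrefixOf_iff_prefix.mp (by simpa using List.find?_some hfind)
        obtain ⟨rest, hrest⟩ := hpre
        have hsrcne : src ≠ [] := good16 _ hmem
        have hdrop : r.drop (src.length - 1) = rest := by
          obtain ⟨m, hm⟩ := length_pos_of_ne_nil hsrcne
          have hx : (c :: r).drop src.length = rest := by
            rw [← hrest]; exact List.drop_left
          rw [hm] at hx ⊢
          simpa [List.drop_succ_cons] using hx
        have hlen : rest.length ≤ n := by
          have hl := congrArg List.length hrest
          have hsl : 1 ≤ src.length := by cases src <;> simp_all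
          simp at hl hs
          omega
        have hnb' : NoBad rest := noBad_of_suffix hnb ⟨src, hrest⟩
        have hscan : typoScan pairs16 (c :: r) = tgt ++ typoScan pairs16 rest := by
          rw [typoScan_some _ _ _ _ _ hfind, hdrop]
        have hchain : chain pairs16 (c :: r) = tgt ++ chain pairs16 rest := by
          rw [← hrest]
          simp only [pairs16, List.mem_cons, List.not_mem_nil, or_false, Prod.mk.injEq] at hmem
          rcases hmem with ⟨rfl, rfl⟩ | ⟨rfl, rfl⟩ | ⟨rfl, rfl⟩ | ⟨rfl, rfl⟩ | ⟨rfl, rfl⟩ | ⟨rfl, rfl⟩ | ⟨rfl, rfl⟩ | ⟨rfl, rfl⟩ | ⟨rfl, rfl⟩ | ⟨rfl, rfl⟩ | ⟨rfl, rfl⟩ | ⟨rfl, rfl⟩ | ⟨rfl, rfl⟩ | ⟨rfl, rfl⟩ | ⟨rfl, rfl⟩ | ⟨rfl, rfl⟩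
          · -- communicate
            refine head_match ([] : List (List Char × List Char)) ([("Communicate".toList, "Comunicate".toList), ("important".toList, "importnt".toList), ("Important".toList, "Importnt".toList), ("latest".toList, "latset".toList), ("Latest".toList, "Latset".toList), ("commit".toList, "comit".toList), ("Commit".toList, "Comit".toList), ("bringing".toList, "bringng".toList), ("Bringing".toList, "Bringng".toList), ("relationship".toList, "relatoinship".toList), ("Relationship".toList, "Relatoinship".toList), ("preferences".toList, "preferneces".toList), ("Preferences".toList, "Preferneces".toList), ("dislikes".toList, "dislkes".toList), ("Dislikes".toList, "Dislkes".toList)] : List (List Char × List Char)) _ _ rest (by decide) good16 hH16 (by decide) (by decide) ?_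
            · intro q hq k hk hdrop
              exact absurd hdrop ((by decide :
                ∀ q ∈ ([("Communicate".toList, "Comunicate".toList), ("important".toList, "importnt".toList), ("Important".toList, "Importnt".toList), ("latest".toList, "latset".toList), ("Latest".toList, "Latset".toList), ("commit".toList, "comit".toList), ("Commit".toList, "Comit".toList), ("bringing".toList, "bringng".toList), ("Bringing".toList, "Bringng".toList), ("relationship".toList, "relatoinship".toList), ("Relationship".toList, "Relatoinship".toList), ("preferences".toList, "preferneces".toList), ("Preferences".toList, "Preferneces".toList), ("dislikes".toList, "dislkes".toList), ("Dislikes".toList, "Dislkes".toList)] : List (List Char × List Char)),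
                  ∀ k < ("comunicate".toList).length, ¬ ("comunicate".toList).drop k <+: q.1) q hq k hk)
          · -- Communicate
            refine head_match ([("communicate".toList, "comunicate".toList)] : List (List Char × List Char)) ([("important".toList, "importnt".toList), ("Important".toList, "Importnt".toList), ("latest".toList, "latset".toList), ("Latest".toList, "Latset".toList), ("commit".toList, "comit".toList), ("Commit".toList, "Comit".toList), ("bringing".toList, "bringng".toList), ("Bringing".toList, "Bringng".toList), ("relationship".toList, "relatoinship".toList), ("Relationship".toList, "Relatoinship".toList), ("preferences".toList, "preferneces".toList), ("Preferences".toList, "Preferneces".toList), ("dislikes".toList, "dislkes".toList), ("Dislikes".toList, "Dislkes".toList)] : List (List Char × List Char)) _ _ rest (by decide) good16 hH16 (by decide) (by decide) ?_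
            · intro q hq k hk hdrop
              exact absurd hdrop ((by decide :
                ∀ q ∈ ([("important".toList, "importnt".toList), ("Important".toList, "Importnt".toList), ("latest".toList, "latset".toList), ("Latest".toList, "Latset".toList), ("commit".toList, "comit".toList), ("Commit".toList, "Comit".toList), ("bringing".toList, "bringng".toList), ("Bringing".toList, "Bringng".toList), ("relationship".toList, "relatoinship".toList), ("Relationship".toList, "Relatoinship".toList), ("preferences".toList, "preferneces".toList), ("Preferences".toList, "Preferneces".toList), ("dislikes".toList, "dislkes".toList), ("Dislikes".toList, "Dislkes".toList)] : List (List Char × List Char)),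
                  ∀ k < ("Comunicate".toList).length, ¬ ("Comunicate".toList).drop k <+: q.1) q hq k hk)
          · -- important
            refine head_match ([("communicate".toList, "comunicate".toList), ("Communicate".toList, "Comunicate".toList)] : List (List Char × List Char)) ([("Important".toList, "Importnt".toList), ("latest".toList, "latset".toList), ("Latest".toList, "Latset".toList), ("commit".toList, "comit".toList), ("Commit".toList, "Comit".toList), ("bringing".toList, "bringng".toList), ("Bringing".toList, "Bringng".toList), ("relationship".toList, "relatoinship".toList), ("Relationship".toList, "Relatoinship".toList), ("preferences".toList, "preferneces".toList), ("Preferences".toList, "Preferneces".toList), ("dislikes".toList, "dislkes".toList), ("Dislikes".toList, "Dislkes".toList)] : List (List Char × List Char)) _ _ rest (by decide) good16 hH16 (by decide) (by decide) ?_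
            · intro q hq k hk hdrop
              exact absurd hdrop ((by decide :
                ∀ q ∈ ([("Important".toList, "Importnt".toList), ("latest".toList, "latset".toList), ("Latest".toList, "Latset".toList), ("commit".toList, "comit".toList), ("Commit".toList, "Comit".toList), ("bringing".toList, "bringng".toList), ("Bringing".toList, "Bringng".toList), ("relationship".toList, "relatoinship".toList), ("Relationship".toList, "Relatoinship".toList), ("preferences".toList, "preferneces".toList), ("Preferences".toList, "Preferneces".toList), ("dislikes".toList, "dislkes".toList), ("Dislikes".toList, "Dislkes".toList)] : List (List Char × List Char)),
                  ∀ k < ("importnt".toList).length, ¬ ("importnt".toList).drop k <+: q.1) q hq k hk)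
          · -- Important
            refine head_match ([("communicate".toList, "comunicate".toList), ("Communicate".toList, "Comunicate".toList), ("important".toList, "importnt".toList)] : List (List Char × List Char)) ([("latest".toList, "latset".toList), ("Latest".toList, "Latset".toList), ("commit".toList, "comit".toList), ("Commit".toList, "Comit".toList), ("bringing".toList, "bringng".toList), ("Bringing".toList, "Bringng".toList), ("relationship".toList, "relatoinship".toList), ("Relationship".toList, "Relatoinship".toList), ("preferences".toList, "preferneces".toList), ("Preferences".toList, "Preferneces".toList), ("dislikes".toList, "dislkes".toList), ("Dislikes".toList, "Dislkes".toList)] : List (List Char × List Char)) _ _ rest (by decide) good16 hH16 (by decide) (by decide) ?_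
            · intro q hq k hk hdrop
              exact absurd hdrop ((by decide :
                ∀ q ∈ ([("latest".toList, "latset".toList), ("Latest".toList, "Latset".toList), ("commit".toList, "comit".toList), ("Commit".toList, "Comit".toList), ("bringing".toList, "bringng".toList), ("Bringing".toList, "Bringng".toList), ("relationship".toList, "relatoinship".toList), ("Relationship".toList, "Relatoinship".toList), ("preferences".toList, "preferneces".toList), ("Preferences".toList, "Preferneces".toList), ("dislikes".toList, "dislkes".toList), ("Dislikes".toList, "Dislkes".toList)] : List (List Char × List Char)),
                  ∀ k < ("Importnt".toList).length, ¬ ("Importnt".toList).drop k <+: q.1) q hq k hk)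
          · -- latest
            refine head_match ([("communicate".toList, "comunicate".toList), ("Communicate".toList, "Comunicate".toList), ("important".toList, "importnt".toList), ("Important".toList, "Importnt".toList)] : List (List Char × List Char)) ([("Latest".toList, "Latset".toList), ("commit".toList, "comit".toList), ("Commit".toList, "Comit".toList), ("bringing".toList, "bringng".toList), ("Bringing".toList, "Bringng".toList), ("relationship".toList, "relatoinship".toList), ("Relationship".toList, "Relatoinship".toList), ("preferences".toList, "preferneces".toList), ("Preferences".toList, "Preferneces".toList), ("dislikes".toList, "dislkes".toList), ("Dislikes".toList, "Dislkes".toList)] : List (List Char × List Char)) _ _ rest (by decide) good16 hH16 (by decide) (by decide) ?_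
            · intro q hq k hk hdrop
              exact absurd hdrop ((by decide :
                ∀ q ∈ ([("Latest".toList, "Latset".toList), ("commit".toList, "comit".toList), ("Commit".toList, "Comit".toList), ("bringing".toList, "bringng".toList), ("Bringing".toList, "Bringng".toList), ("relationship".toList, "relatoinship".toList), ("Relationship".toList, "Relatoinship".toList), ("preferences".toList, "preferneces".toList), ("Preferences".toList, "Preferneces".toList), ("dislikes".toList, "dislkes".toList), ("Dislikes".toList, "Dislkes".toList)] : List (List Char × List Char)),
                  ∀ k < ("latset".toList).length, ¬ ("latset".toList).drop k <+: q.1) q hq k hk)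
          · -- Latest
            refine head_match ([("communicate".toList, "comunicate".toList), ("Communicate".toList, "Comunicate".toList), ("important".toList, "importnt".toList), ("Important".toList, "Importnt".toList), ("latest".toList, "latset".toList)] : List (List Char × List Char)) ([("commit".toList, "comit".toList), ("Commit".toList, "Comit".toList), ("bringing".toList, "bringng".toList), ("Bringing".toList, "Bringng".toList), ("relationship".toList, "relatoinship".toList), ("Relationship".toList, "Relatoinship".toList), ("preferences".toList, "preferneces".toList), ("Preferences".toList, "Preferneces".toList), ("dislikes".toList, "dislkes".toList), ("Dislikes".toList, "Dislkes".toList)] : List (List Char × List Char)) _ _ rest (by decide) good16 hH16 (by decide) (by decide) ?_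
            · intro q hq k hk hdrop
              exact absurd hdrop ((by decide :
                ∀ q ∈ ([("commit".toList, "comit".toList), ("Commit".toList, "Comit".toList), ("bringing".toList, "bringng".toList), ("Bringing".toList, "Bringng".toList), ("relationship".toList, "relatoinship".toList), ("Relationship".toList, "Relatoinship".toList), ("preferences".toList, "preferneces".toList), ("Preferences".toList, "Preferneces".toList), ("dislikes".toList, "dislkes".toList), ("Dislikes".toList, "Dislkes".toList)] : List (List Char × List Char)),
                  ∀ k < ("Latset".toList).length, ¬ ("Latset".toList).drop k <+: q.1) q hq k hk)
          · -- commit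
            refine head_match ([("communicate".toList, "comunicate".toList), ("Communicate".toList, "Comunicate".toList), ("important".toList, "importnt".toList), ("Important".toList, "Importnt".toList), ("latest".toList, "latset".toList), ("Latest".toList, "Latset".toList)] : List (List Char × List Char)) ([("Commit".toList, "Comit".toList), ("bringing".toList, "bringng".toList), ("Bringing".toList, "Bringng".toList), ("relationship".toList, "relatoinship".toList), ("Relationship".toList, "Relatoinship".toList), ("preferences".toList, "preferneces".toList), ("Preferences".toList, "Preferneces".toList), ("dislikes".toList, "dislkes".toList), ("Dislikes".toList, "Dislkes".toList)] : List (List Char × List Char)) _ _ rest (by decide) good16 hH16 (by decide) (by decide) ?_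
            · intro q hq k hk hdrop
              exact absurd hdrop ((by decide :
                ∀ q ∈ ([("Commit".toList, "Comit".toList), ("bringing".toList, "bringng".toList), ("Bringing".toList, "Bringng".toList), ("relationship".toList, "relatoinship".toList), ("Relationship".toList, "Relatoinship".toList), ("preferences".toList, "preferneces".toList), ("Preferences".toList, "Preferneces".toList), ("dislikes".toList, "dislkes".toList), ("Dislikes".toList, "Dislkes".toList)] : List (List Char × List Char)),
                  ∀ k < ("comit".toList).length, ¬ ("comit".toList).drop k <+: q.1) q hq k hk)
          · -- Commit
            refine head_match ([("communicate".toList, "comunicate".toList), ("Communicate".toList, "Comunicate".toList), ("important".toList, "importnt".toList), ("Important".toList, "Importnt".toList), ("latest".toList, "latset".toList), ("Latest".toList, "Latset".toList), ("commit".toList, "comit".toList)] : List (List Char × List Char)) ([("bringing".toList, "bringng".toList), ("Bringing".toList, "Bringng".toList), ("relationship".toList, "relatoinship".toList), ("Relationship".toList, "Relatoinship".toList), ("preferences".toList, "preferneces".toList), ("Preferences".toList, "Preferneces".toList), ("dislikes".toList, "dislkes".toList), ("Dislikes".toList, "Dislkes".toList)] : List (List Char × List Char)) _ _ rest (by decide)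 good16 hH16 (by decide) (by decide) ?_
            · intro q hq k hk hdrop
              exact absurd hdrop ((by decide :
                ∀ q ∈ ([("bringing".toList, "bringng".toList), ("Bringing".toList, "Bringng".toList), ("relationship".toList, "relatoinship".toList), ("Relationship".toList, "Relatoinship".toList), ("preferences".toList, "preferneces".toList), ("Preferences".toList, "Preferneces".toList), ("dislikes".toList, "dislkes".toList), ("Dislikes".toList, "Dislkes".toList)] : List (List Char × List Char)),
                  ∀ k < ("Comit".toList).length, ¬ ("Comit".toList).drop k <+: q.1) q hq k hk)
          · -- bringing
            refine head_match ([("communicate".toList, "comunicate".toList), ("Communicate".toList, "Comunicate".toList), ("important".toList, "importnt".toList), ("Important".toList, "Importnt".toList), ("latest".toList, "latset".toList), ("Latest".toList, "Latset".toList), ("commit".toList, "comit".toList), ("Commit".toList, "Comit".toList)] : List (List Char × List Char)) ([("Bringing".toList, "Bringng".toList), ("relationship".toList, "relatoinship".toList), ("Relationship".toList, "Relatoinship".toList), ("preferences".toList, "preferneces".toList), ("Preferences".toList, "Preferneces".toList), ("dislikes".toList, "dislkes".toList), ("Dislikes".toList, "Dislkes".toList)] : List (List Char × List Char)) _ _ rest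 (by decide) good16 hH16 (by decide) (by decide) ?_
            · intro q hq k hk hdrop
              exact absurd hdrop ((by decide :
                ∀ q ∈ ([("Bringing".toList, "Bringng".toList), ("relationship".toList, "relatoinship".toList), ("Relationship".toList, "Relatoinship".toList), ("preferences".toList, "preferneces".toList), ("Preferences".toList, "Preferneces".toList), ("dislikes".toList, "dislkes".toList), ("Dislikes".toList, "Dislkes".toList)] : List (List Char × List Char)),
                  ∀ k < ("bringng".toList).length, ¬ ("bringng".toList).drop k <+: q.1) q hq k hk)
          · -- Bringing
            refine head_match ([("communicate".toList, "comunicate".toList), ("Communicate".toList, "Comunicate".toList), ("important".toList, "importnt".toList), ("Important".toList, "Importnt".toList), ("latest".toList, "latset".toList), ("Latest".toList, "Latset".toList), ("commit".toList, "comit".toList), ("Commit".toList, "Comit".toList), ("bringing".toList, "bringng".toList)] : List (List Char × List Char)) ([("relationship".toList, "relatoinship".toList), ("Relationship".toList, "Relatoinship".toList), ("preferences".toList, "preferneces".toList), ("Preferences".toList, "Preferneces".toList), ("dislikes".toList, "dislkes".toList), ("Dislikes".toList, "Dislkes".toList)] : List (List Char × List Char)) _ _ rest (by decide) good16 hH16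 (by decide) (by decide) ?_
            · intro q hq k hk hdrop
              exact absurd hdrop ((by decide :
                ∀ q ∈ ([("relationship".toList, "relatoinship".toList), ("Relationship".toList, "Relatoinship".toList), ("preferences".toList, "preferneces".toList), ("Preferences".toList, "Preferneces".toList), ("dislikes".toList, "dislkes".toList), ("Dislikes".toList, "Dislkes".toList)] : List (List Char × List Char)),
                  ∀ k < ("Bringng".toList).length, ¬ ("Bringng".toList).drop k <+: q.1) q hq k hk)
          · -- relationship
            refine head_match ([("communicate".toList, "comunicate".toList), ("Communicate".toList, "Comunicate".toList), ("important".toList, "importnt".toList), ("Important".toList, "Importnt".toList), ("latest".toList, "latset".toList), ("Latest".toList, "Latset".toList), ("commit".toList, "comit".toList), ("Commit".toList, "Comit".toList), ("bringing".toList, "bringng".toList), ("Bringing".toList, "Bringng".toList)] : List (List Char × List Char)) ([("Relationship".toList, "Relatoinship".toList), ("preferences".toList, "preferneces".toList), ("Preferences".toList, "Preferneces".toList), ("dislikes".toList, "dislkes".toList), ("Dislikes".toList, "Dislkes".toList)] : List (List Char × List Char)) _ _ rest (by decide) good16 hH16 (by decide) (by decide) ?_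
            · intro q hq k hk hdrop
              obtain ⟨hq1, rfl⟩ := (by decide :
                  ∀ q ∈ ([("Relationship".toList, "Relatoinship".toList), ("preferences".toList, "preferneces".toList), ("Preferences".toList, "Preferneces".toList), ("dislikes".toList, "dislkes".toList), ("Dislikes".toList, "Dislkes".toList)] : List (List Char × List Char)),
                    ∀ k < ("relatoinship".toList).length, ("relatoinship".toList).drop k <+: q.1 →
                      q.1 = "preferences".toList ∧ k = 11) q hq k hk hdrop
              have hgoal : q.1.drop (("relatoinship".toList).length - 11) = "references".toList := by
                rw [hq1]; decide
              rw [hgoal]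
              apply nc_chain _ _ (fun pt hpt => refsH16 pt
                ((by decide : ∀ a ∈ ([("communicate".toList, "comunicate".toList), ("Communicate".toList, "Comunicate".toList), ("important".toList, "importnt".toList), ("Important".toList, "Importnt".toList), ("latest".toList, "latset".toList), ("Latest".toList, "Latset".toList), ("commit".toList, "comit".toList), ("Commit".toList, "Comit".toList), ("bringing".toList, "bringng".toList), ("Bringing".toList, "Bringng".toList)] ++ [("relationship".toList, "relatoinship".toList)] : List (List Char × List Char)), a ∈ pairs16) pt hpt))
              intro hrp
              obtain ⟨z, hz⟩ := hrp
              exact hnb.1 ⟨[], z, by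
                rw [List.nil_append,
                  (by decide : "relationshipreferences".toList =
                    "relationship".toList ++ "references".toList),
                  List.append_assoc, hz, hrest]⟩
          · -- Relationship
            refine head_match ([("communicate".toList, "comunicate".toList), ("Communicate".toList, "Comunicate".toList), ("important".toList, "importnt".toList), ("Important".toList, "Importnt".toList), ("latest".toList, "latset".toList), ("Latest".toList, "Latset".toList), ("commit".toList, "comit".toList), ("Commit".toList, "Comit".toList), ("bringing".toList, "bringng".toList), ("Bringing".toList, "Bringng".toList), ("relationship".toList, "relatoinship".toList)] : List (List Char × List Char)) ([("preferences".toList, "preferneces".toList), ("Preferences".toList, "Preferneces".toList), ("dislikes".toList, "dislkes".toList), ("Dislikes".toList, "Dislkes".toList)] : List (List Char × List Char)) _ _ rest (by decide) good16 hH16 (by decide) (by decide) ?_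
            · intro q hq k hk hdrop
              obtain ⟨hq1, rfl⟩ := (by decide :
                  ∀ q ∈ ([("preferences".toList, "preferneces".toList), ("Preferences".toList, "Preferneces".toList), ("dislikes".toList, "dislkes".toList), ("Dislikes".toList, "Dislkes".toList)] : List (List Char × List Char)),
                    ∀ k < ("Relatoinship".toList).length, ("Relatoinship".toList).drop k <+: q.1 →
                      q.1 = "preferences".toList ∧ k = 11) q hq k hk hdrop
              have hgoal : q.1.drop (("Relatoinship".toList).length - 11) = "references".toList := by
                rw [hq1]; decide
              rw [hgoal]
              apply nc_chain _ _ (fun pt hpt => refsH16 pt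
                ((by decide : ∀ a ∈ ([("communicate".toList, "comunicate".toList), ("Communicate".toList, "Comunicate".toList), ("important".toList, "importnt".toList), ("Important".toList, "Importnt".toList), ("latest".toList, "latset".toList), ("Latest".toList, "Latset".toList), ("commit".toList, "comit".toList), ("Commit".toList, "Comit".toList), ("bringing".toList, "bringng".toList), ("Bringing".toList, "Bringng".toList), ("relationship".toList, "relatoinship".toList)] ++ [("Relationship".toList, "Relatoinship".toList)] : List (List Char × List Char)), a ∈ pairs16) pt hpt))
              intro hrp
              obtain ⟨z, hz⟩ := hrp
              exact hnb.2 ⟨[], z, by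
                rw [List.nil_append,
                  (by decide : "Relationshipreferences".toList =
                    "Relationship".toList ++ "references".toList),
                  List.append_assoc, hz, hrest]⟩
          · -- preferences
            refine head_match ([("communicate".toList, "comunicate".toList), ("Communicate".toList, "Comunicate".toList), ("important".toList, "importnt".toList), ("Important".toList, "Importnt".toList), ("latest".toList, "latset".toList), ("Latest".toList, "Latset".toList), ("commit".toList, "comit".toList), ("Commit".toList, "Comit".toList), ("bringing".toList, "bringng".toList), ("Bringing".toList, "Bringng".toList), ("relationship".toList, "relatoinship".toList), ("Relationship".toList, "Relatoinship".toList)] : List (List Char × List Char)) ([("Preferences".toList, "Preferneces".toList), ("dislikes".toList, "dislkes".toList), ("Dislikes".toList, "Dislkes".toList)] : List (List Char × List Char)) _ _ rest (by decide) good16 hH16 (by decide) (by decide) ?_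
            · intro q hq k hk hdrop
              exact absurd hdrop ((by decide :
                ∀ q ∈ ([("Preferences".toList, "Preferneces".toList), ("dislikes".toList, "dislkes".toList), ("Dislikes".toList, "Dislkes".toList)] : List (List Char × List Char)),
                  ∀ k < ("preferneces".toList).length, ¬ ("preferneces".toList).drop k <+: q.1) q hq k hk)
          · -- Preferences
            refine head_match ([("communicate".toList, "comunicate".toList), ("Communicate".toList, "Comunicate".toList), ("important".toList, "importnt".toList), ("Important".toList, "Importnt".toList), ("latest".toList, "latset".toList), ("Latest".toList, "Latset".toList), ("commit".toList, "comit".toList), ("Commit".toList, "Comit".toList), ("bringing".toList, "bringng".toList), ("Bringing".toList, "Bringng".toList), ("relationship".toList, "relatoinship".toList), ("Relationship".toList, "Relatoinship".toList), ("preferences".toList, "preferneces".toList)] : List (List Char × List Char)) ([("dislikes".toList, "dislkes".toList), ("Dislikes".toList, "Dislkes".toList)] : List (List Char × List Char)) _ _ rest (by decide) good16 hH16 (by decide) (by decide) ?_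
            · intro q hq k hk hdrop
              exact absurd hdrop ((by decide :
                ∀ q ∈ ([("dislikes".toList, "dislkes".toList), ("Dislikes".toList, "Dislkes".toList)] : List (List Char × List Char)),
                  ∀ k < ("Preferneces".toList).length, ¬ ("Preferneces".toList).drop k <+: q.1) q hq k hk)
          · -- dislikes
            refine head_match ([("communicate".toList, "comunicate".toList), ("Communicate".toList, "Comunicate".toList), ("important".toList, "importnt".toList), ("Important".toList, "Importnt".toList), ("latest".toList, "latset".toList), ("Latest".toList, "Latset".toList), ("commit".toList, "comit".toList), ("Commit".toList, "Comit".toList), ("bringing".toList, "bringng".toList), ("Bringing".toList, "Bringng".toList), ("relationship".toList, "relatoinship".toList), ("Relationship".toList, "Relatoinship".toList), ("preferences".toList, "preferneces".toList), ("Preferences".toList, "Preferneces".toList)] : List (List Char × List Char)) ([("Dislikes".toList, "Dislkes".toList)] : List (List Char × List Char)) _ _ rest (by decide) good16 hH16 (by decide) (by decide) ?_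
            · intro q hq k hk hdrop
              exact absurd hdrop ((by decide :
                ∀ q ∈ ([("Dislikes".toList, "Dislkes".toList)] : List (List Char × List Char)),
                  ∀ k < ("dislkes".toList).length, ¬ ("dislkes".toList).drop k <+: q.1) q hq k hk)
          · -- Dislikes
            refine head_match ([("communicate".toList, "comunicate".toList), ("Communicate".toList, "Comunicate".toList), ("important".toList, "importnt".toList), ("Important".toList, "Importnt".toList), ("latest".toList, "latset".toList), ("Latest".toList, "Latset".toList), ("commit".toList, "comit".toList), ("Commit".toList, "Comit".toList), ("bringing".toList, "bringng".toList), ("Bringing".toList, "Bringng".toList), ("relationship".toList, "relatoinship".toList), ("Relationship".toList, "Relatoinship".toList), ("preferences".toList, "preferneces".toList), ("Preferences".toList, "Preferneces".toList), ("dislikes".toList, "dislkes".toList)] : List (List Char × List Char)) ([] : List (List Char × List Char)) _ _ rest (by decide) good16 hH16 (by decide) (by decide) ?_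
            · intro q hq k hk hdrop
              exact absurd hdrop ((by decide :
                ∀ q ∈ ([] : List (List Char × List Char)),
                  ∀ k < ("Dislkes".toList).length, ¬ ("Dislkes".toList).drop k <+: q.1) q hq k hk)
        rw [hchain, hscan, ih rest hlen hnb']

theorem portA_eq (q : String) : (typo_noise_query_py q).toList = chain pairs16 q.toList := by
  simp only [typo_noise_query_py, typoReplacements, List.foldl]
  simp only [(show pyCapitalize "communicate" = "Communicate" by decide),
    (show pyCapitalize "important" = "Important" by decide),
    (show pyCapitalize "latest" = "Latest" by decide),
    (show pyCapitalize "commit" = "Commit" by decide),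
    (show pyCapitalize "bringing" = "Bringing" by decide),
    (show pyCapitalize "relationship" = "Relationship" by decide),
    (show pyCapitalize "preferences" = "Preferences" by decide),
    (show pyCapitalize "dislikes" = "Dislikes" by decide),
    (show pyCapitalize "comunicate" = "Comunicate" by decide),
    (show pyCapitalize "importnt" = "Importnt" by decide),
    (show pyCapitalize "latset" = "Latset" by decide),
    (show pyCapitalize "comit" = "Comit" by decide),
    (show pyCapitalize "bringng" = "Bringng" by decide),
    (show pyCapitalize "relatoinship" = "Relatoinship" by decide),
    (show pyCapitalize "preferneces" = "Preferneces" by decide),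
    (show pyCapitalize "dislkes" = "Dislkes" by decide)]
  simp only [PySem.Str.toList_replace]
  repeat rw [replace_eq_repc]
  · simp only [chain, pairs16, List.foldl]
  all_goals decide

theorem portB_eq (q : String) : (typo_noise_query_py_alt q).toList = typoScan pairs16 q.toList := by
  rw [typo_noise_query_py_alt, String.toList_ofList,
    (by decide : typoPairs = pairs16)]

-- ===== VERDICT (by name: the statement is the Claim_ definition above) =====
theorem typo_noise_query_py_spec : Claim_equal_typo_noise_query_py := by
  intro query _ hpre
  unfold Spec_typo_noise_query_py
  apply String.toList_inj.mp
  rw [portA_eq, portB_eq]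
  apply main_eq query.toList.length _ le_rfl
  obtain ⟨h1, h2⟩ := hpre
  simp only [PySem.Str.isIn] at h1 h2
  exact ⟨(PySem.Chars.isIn_eq_false_iff _ _).mp h1, (PySem.Chars.isIn_eq_false_iff _ _).mp h2⟩
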